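-- pv_equiv track=rewrite | github.com/EliasEbner/WKonnect | ai-call/houston/houston.py | have_common_prefix_over_10_chars
-- ===== SOURCE A (Python) =====
-- def have_common_prefix_over_10_chars(str1, str2):
--     min_length = min(len(str1), len(str2))
--     match_length = 0
--     for i in range(min_length):
--         if str1[i] == str2[i]:
--             match_length += 1
--             if match_length >= 10:
--                 return True
--         else:
--             break
--     return False
-- ===== SOURCE B (Python) =====
-- def have_common_prefix_over_10_chars(str1, str2):
--     return len(str1) >= 10 and len(str2) >= 10 and str1[:10] == str2[:10]
-- ===== Notes on version B (the rewrite author's own statement) =====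
-- stated objective: simpler
-- what changed: Replaced the character-by-character counting loop with a single closed-form slice comparison: both strings must have length >= 10 and their first 10 characters must be equal.
import Mathlib
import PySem

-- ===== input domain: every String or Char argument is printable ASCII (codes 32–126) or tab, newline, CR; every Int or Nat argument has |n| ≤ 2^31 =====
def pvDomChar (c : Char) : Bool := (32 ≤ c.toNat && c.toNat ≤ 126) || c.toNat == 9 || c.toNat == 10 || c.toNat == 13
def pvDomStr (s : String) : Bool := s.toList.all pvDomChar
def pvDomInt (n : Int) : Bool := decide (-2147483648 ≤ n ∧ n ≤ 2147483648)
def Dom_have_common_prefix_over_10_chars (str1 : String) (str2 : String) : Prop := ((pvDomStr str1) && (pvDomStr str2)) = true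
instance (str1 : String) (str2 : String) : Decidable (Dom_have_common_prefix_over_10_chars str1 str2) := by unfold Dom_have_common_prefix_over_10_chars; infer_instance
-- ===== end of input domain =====

-- ===== PORT A =====
-- loop of A: walk both strings in lockstep, counting consecutive matches; break on mismatch
def pvALoop : List Char → List Char → Nat → Bool
  | c1 :: r1, c2 :: r2, ml =>
      if c1 == c2 then
        if ml + 1 ≥ 10 then true else pvALoop r1 r2 (ml + 1)
      else false
  | _, _, _ => false

def have_common_prefix_over_10_chars (str1 : String) (str2 : String) : Bool :=
  pvALoop str1.toList str2.toList 0

-- ===== PORT B =====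
-- B: closed-form check — both lengths ≥ 10 and the first 10 characters are equal
def have_common_prefix_over_10_chars_alt (str1 : String) (str2 : String) : Bool :=
  decide (10 ≤ str1.toList.length) && decide (10 ≤ str2.toList.length) &&
    (str1.toList.take 10 == str2.toList.take 10)

-- ===== PRECONDITION & SPEC =====
def Spec_have_common_prefix_over_10_chars (str1 : String) (str2 : String) (out : Bool) : Prop := out = have_common_prefix_over_10_chars_alt str1 str2
instance (str1 : String) (str2 : String) (out : Bool) : Decidable (Spec_have_common_prefix_over_10_chars str1 str2 out) := by unfold Spec_have_common_prefix_over_10_chars; infer_instance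

-- ===== CLAIM (what is proved, stated in full; the proofs are below) =====
def Claim_equal_have_common_prefix_over_10_chars : Prop := ∀ (str1 : String) (str2 : String), Dom_have_common_prefix_over_10_chars str1 str2 → Spec_have_common_prefix_over_10_chars str1 str2 (have_common_prefix_over_10_chars str1 str2)

-- ===== LEMMAS AND PROOFS =====

-- ===== VERDICT (by name: the statement is the Claim_ definition above) =====
lemma pvALoop_eq : ∀ (l1 l2 : List Char) (ml : Nat), ml < 10 →
    pvALoop l1 l2 ml =
      (decide (10 - ml ≤ l1.length) && decide (10 - ml ≤ l2.length) &&
        (l1.take (10 - ml) == l2.take (10 - ml)))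
  | [], l2, ml, h => by
    simp [pvALoop]; omega
  | c1 :: r1, [], ml, h => by
    simp [pvALoop]
    omega
  | c1 :: r1, c2 :: r2, ml, h => by
    unfold pvALoop
    by_cases hc : c1 = c2
    · by_cases h9 : ml + 1 ≥ 10
      · have hml : ml = 9 := by omega
        subst hml hc
        simp
      · have := pvALoop_eq r1 r2 (ml + 1) (by omega)
        subst hc
        have hk : 10 - ml = (10 - (ml + 1)) + 1 := by omega
        simp [h9, this, hk, List.take_succ_cons]
    · have hk : 10 - ml = (9 - ml) + 1 := by omega
      simp [hc, hk, List.take_succ_cons]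

theorem have_common_prefix_over_10_chars_spec : Claim_equal_have_common_prefix_over_10_chars := by
  intro s1 s2 _
  unfold Spec_have_common_prefix_over_10_chars
  unfold have_common_prefix_over_10_chars have_common_prefix_over_10_chars_alt
  rw [pvALoop_eq _ _ 0 (by omega)]
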